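-- pv_equiv track=rewrite | github.com/guyleaf/python | homework/032. 旋轉抽抽樂/test32_complex.py | check
-- ===== SOURCE A (Python) =====
-- def check(rank): #先去除旋轉可抵銷之代號
--     for i in range(1, 3): #代號1~2
--         if(rank.count(str(i))==4): #去除可旋轉360度之代號
--             rank.replace(str(i), '', 4)
--     rank = rank.replace('3', '', (rank.count('3')//2)*2)  #去除可旋轉360度之代號
--     num = min(rank.count('1'), rank.count('2')) #右旋與左旋 取最小個數(也就是可抵銷之個數)
--     rank = rank.replace('1', '', num) #去除
--     rank = rank.replace('2', '', num) #去除
--     return rank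
-- ===== SOURCE B (Python) =====
-- def check(rank):
--     n1 = n2 = min(rank.count('1'), rank.count('2'))
--     n3 = (rank.count('3') // 2) * 2
--     out = []
--     for ch in rank:
--         if ch == '1' and n1 > 0:
--             n1 -= 1
--         elif ch == '2' and n2 > 0:
--             n2 -= 1
--         elif ch == '3' and n3 > 0:
--             n3 -= 1
--         else:
--             out.append(ch)
--     return ''.join(out)
-- ===== Notes on version B (the rewrite author's own statement) =====
-- stated objective: alternative
-- what changed: A's dead for-loop and three sequential count/replace passes are replaced by counting the three removal budgets up front and one single traversal that skips a char while its budget is positive.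
import Mathlib
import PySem

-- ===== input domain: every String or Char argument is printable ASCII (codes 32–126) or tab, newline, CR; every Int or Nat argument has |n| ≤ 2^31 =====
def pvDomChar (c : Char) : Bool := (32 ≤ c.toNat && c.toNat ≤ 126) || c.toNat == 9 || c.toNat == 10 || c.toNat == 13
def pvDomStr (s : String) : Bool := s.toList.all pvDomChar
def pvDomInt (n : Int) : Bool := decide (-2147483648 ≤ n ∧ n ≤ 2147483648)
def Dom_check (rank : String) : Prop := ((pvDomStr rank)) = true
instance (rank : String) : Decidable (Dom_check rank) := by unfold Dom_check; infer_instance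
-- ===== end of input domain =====

-- B replaces A's four sequential count/replace passes by one traversal with three removal budgets (alternative decomposition, same cost).

-- ===== PORT A =====
-- str.replace(c, '', n) for a single character c and empty replacement: remove the first n occurrences of c.
-- Exact port of that primitive for this (single-char pattern, empty replacement) case.
def removeN : List Char → Char → Nat → List Char
  | [], _, _ => []
  | x :: xs, c, n =>
      if n = 0 then x :: xs
      else if x = c then removeN xs c (n - 1)
      else x :: removeN xs c n

-- The first for-loop of A only evaluates `rank.replace(...)` as an expression statement and
-- discards the result (and reassigns nothing), so it has no effect; it is ported as this no-op fold.
def check (rank : String) : String :=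
  let rank := (PySem.List.pyRange 1 3 1).foldl
    (fun (r : String) i =>
      if PySem.Str.count r (PySem.Int.toStr i) = 4 then r else r) rank
  let rank1 := String.ofList (removeN rank.toList '3' ((PySem.Str.count rank "3") / 2 * 2))
  let num := min (PySem.Str.count rank1 "1") (PySem.Str.count rank1 "2")
  let rank2 := String.ofList (removeN rank1.toList '1' num)
  let rank3 := String.ofList (removeN rank2.toList '2' num)
  rank3

-- ===== PORT B =====
-- state: (out, n1, n2, n3)
def checkAltStep (s : List Char × Nat × Nat × Nat) (ch : Char) : List Char × Nat × Nat × Nat :=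
  if ch = '1' ∧ 0 < s.2.1 then (s.1, s.2.1 - 1, s.2.2.1, s.2.2.2)
  else if ch = '2' ∧ 0 < s.2.2.1 then (s.1, s.2.1, s.2.2.1 - 1, s.2.2.2)
  else if ch = '3' ∧ 0 < s.2.2.2 then (s.1, s.2.1, s.2.2.1, s.2.2.2 - 1)
  else (s.1 ++ [ch], s.2)

def check_alt (rank : String) : String :=
  let num := min (PySem.Str.count rank "1") (PySem.Str.count rank "2")
  let n3 := (PySem.Str.count rank "3") / 2 * 2
  String.ofList (rank.toList.foldl checkAltStep ([], num, num, n3)).1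

-- ===== PRECONDITION & SPEC =====
def Spec_check (rank : String) (out : String) : Prop := out = check_alt rank
instance (rank : String) (out : String) : Decidable (Spec_check rank out) := by unfold Spec_check; infer_instance

-- ===== CLAIM (what is proved, stated in full; the proofs are below) =====
def Claim_equal_check : Prop := ∀ (rank : String), Dom_check rank → Spec_check rank (check rank)

-- ===== LEMMAS AND PROOFS =====

theorem count_go_single (c : Char) : ∀ (fuel : Nat) (l : List Char) (acc : Nat),
    l.length ≤ fuel → PySem.Chars.count.go [c] fuel l acc = acc + l.count c := by
  intro fuel
  induction fuel with
  | zero =>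
    intro l acc h
    have : l = [] := List.length_eq_zero_iff.mp (Nat.le_zero.mp h)
    subst this; simp [PySem.Chars.count.go]
  | succ n ih =>
    intro l acc h
    cases l with
    | nil => simp [PySem.Chars.count.go]
    | cons x t =>
      simp only [PySem.Chars.count.go]
      by_cases hx : x = c
      · subst hx
        have hp : [x].isPrefixOf (x :: t) = true := by simp [List.isPrefixOf]
        rw [hp]
        simp only [if_true]
        have hd : List.drop ([x] : List Char).length (x :: t) = t := by simp
        rw [hd, ih t (acc + 1) (by simpa using h)]
        simp
        omega
      · have : [c].isPrefixOf (x :: t) = false := by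
          simp [List.isPrefixOf]; exact fun hcx => absurd hcx.symm hx
        rw [this]
        simp only [Bool.false_eq_true, if_false]
        rw [ih t acc (by simpa using h)]
        simp [hx]

theorem count_single (s : String) (c : Char) :
    PySem.Str.count s (String.ofList [c]) = s.toList.count c := by
  rw [PySem.Str.count_eq]
  simp only [String.toList_ofList]
  unfold PySem.Chars.count
  simp only [List.isEmpty_cons, Bool.false_eq_true, if_false]
  simpa using count_go_single c _ _ 0 (le_refl _)

theorem removeN_zero (l : List Char) (c : Char) : removeN l c 0 = l := by
  cases l <;> simp [removeN]

theorem removeN_cons_ne (x c : Char) (t : List Char) (n : Nat) (h : x ≠ c) :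
    removeN (x :: t) c n = x :: removeN t c n := by
  cases n with
  | zero => cases t with
    | nil => simp [removeN]
    | cons y u => simp [removeN]
  | succ m => simp [removeN, h]

theorem count_removeN_ne (c d : Char) (h : c ≠ d) : ∀ (l : List Char) (n : Nat),
    (removeN l c n).count d = l.count d := by
  intro l
  induction l with
  | nil => intro n; simp [removeN]
  | cons x t ih =>
    intro n
    by_cases hx : x = c
    · subst hx
      cases n with
      | zero => simp [removeN]
      | succ m =>
        simp only [removeN, Nat.succ_ne_zero, if_false, if_true, Nat.succ_sub_one]
        rw [ih m]
        simp [h]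
    · rw [removeN_cons_ne x c t n hx]
      simp [List.count_cons, ih n]

-- the single pass with budgets equals the three sequential removal passes
theorem pass_eq_removes : ∀ (l acc : List Char) (n1 n2 n3 : Nat),
    (l.foldl checkAltStep (acc, n1, n2, n3)).1
      = acc ++ removeN (removeN (removeN l '3' n3) '1' n1) '2' n2 := by
  intro l
  induction l with
  | nil => intro acc n1 n2 n3; simp [removeN]
  | cons x t ih =>
    intro acc n1 n2 n3
    simp only [List.foldl_cons]
    by_cases h1 : x = '1'
    · subst h1
      cases n1 with
      | zero =>
        have hs : checkAltStep (acc, 0, n2, n3) '1' = (acc ++ ['1'], 0, n2, n3) := by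
          simp [checkAltStep]
        rw [hs, ih]
        have hne : ('1' : Char) ≠ '2' := by decide
        have hne3 : ('1' : Char) ≠ '3' := by decide
        rw [removeN_cons_ne _ _ _ _ hne3, removeN_zero, removeN_zero,
          removeN_cons_ne _ _ _ _ hne]
        simp
      | succ m =>
        have : checkAltStep (acc, m + 1, n2, n3) '1' = (acc, m, n2, n3) := by
          simp [checkAltStep]
        rw [this, ih]
        have hne3 : ('1' : Char) ≠ '3' := by decide
        rw [removeN_cons_ne _ _ _ _ hne3]
        simp [removeN]
    · by_cases h2 : x = '2'
      · subst h2
        cases n2 with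
        | zero =>
          have : checkAltStep (acc, n1, 0, n3) '2' = (acc ++ ['2'], n1, 0, n3) := by
            simp [checkAltStep]
          rw [this, ih]
          have hne3 : ('2' : Char) ≠ '3' := by decide
          have hne1 : ('2' : Char) ≠ '1' := by decide
          rw [removeN_cons_ne _ _ _ _ hne3, removeN_cons_ne _ _ _ _ hne1,
            removeN_zero, removeN_zero]
          simp
        | succ m =>
          have : checkAltStep (acc, n1, m + 1, n3) '2' = (acc, n1, m, n3) := by
            simp [checkAltStep]
          rw [this, ih]
          have hne3 : ('2' : Char) ≠ '3' := by decide
          have hne1 : ('2' : Char) ≠ '1' := by decide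
          rw [removeN_cons_ne _ _ _ _ hne3, removeN_cons_ne _ _ _ _ hne1]
          simp [removeN]
      · by_cases h3 : x = '3'
        · subst h3
          cases n3 with
          | zero =>
            have : checkAltStep (acc, n1, n2, 0) '3' = (acc ++ ['3'], n1, n2, 0) := by
              simp [checkAltStep]
            rw [this, ih]
            have hne1 : ('3' : Char) ≠ '1' := by decide
            have hne2 : ('3' : Char) ≠ '2' := by decide
            rw [removeN_zero, removeN_zero, removeN_cons_ne _ _ _ _ hne1,
              removeN_cons_ne _ _ _ _ hne2]
            simp
          | succ m =>
            have : checkAltStep (acc, n1, n2, m + 1) '3' = (acc, n1, n2, m) := by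
              simp [checkAltStep]
            rw [this, ih]
            simp [removeN]
        · have : checkAltStep (acc, n1, n2, n3) x = (acc ++ [x], n1, n2, n3) := by
            simp [checkAltStep, h1, h2, h3]
          rw [this, ih]
          rw [removeN_cons_ne _ _ _ _ h3, removeN_cons_ne _ _ _ _ h1,
            removeN_cons_ne _ _ _ _ h2]
          simp

theorem foldl_noop (l : List Int) (r : String) :
    l.foldl (fun (r : String) i =>
      if PySem.Str.count r (PySem.Int.toStr i) = 4 then r else r) r = r := by
  induction l generalizing r with
  | nil => rfl
  | cons x t ih => simpa only [List.foldl_cons, ite_self] using ih r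

-- ===== VERDICT (by name: the statement is the Claim_ definition above) =====
theorem check_spec : Claim_equal_check := by
  intro rank _
  unfold Spec_check check check_alt
  simp only [foldl_noop]
  have h1 : ("1" : String) = String.ofList ['1'] := rfl
  have h2 : ("2" : String) = String.ofList ['2'] := rfl
  have h3 : ("3" : String) = String.ofList ['3'] := rfl
  rw [h1, h2, h3]
  rw [count_single rank '3', count_single rank '1', count_single rank '2']
  set n3 := rank.toList.count '3' / 2 * 2 with hn3
  simp only [String.toList_ofList]
  rw [count_single _ '1', count_single _ '2']
  simp only [String.toList_ofList]
  rw [count_removeN_ne '3' '1' (by decide), count_removeN_ne '3' '2' (by decide)]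
  rw [pass_eq_removes]
  rfl
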